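-- pv_equiv track=rewrite | github.com/sealsni1/CSE231 | proj05.py | calc_similarity_scores
-- ===== SOURCE A (Python) =====
-- def num_in_common_between_lists(list1, list2):
--     '''
--     Finds the 'count' number of similar friends between each user.
--     Returns that number to calc_similarity_scores(network) to be
--     later added to the similarity_matrix list.
--     '''
--
--     # Assign count to 0 before for loop
--     count = 0
--
--     # Iterates through both user u's and user v's friends lists
--     for num1 in list1:
--         for num2 in list2:
--             if num1 == num2:
--
--                 # If user is in both frinds lists increase count by 1
--                 count += 1
--
--     return count
--
-- def calc_similarity_scores(network):
--     '''
--     Creates a new list called similarity_matrix that holds the number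
--     of mutual friends each user has with one another.
--     Calls num_in_common_between_lists(list1, list2) to get the 'count' of mutual friends
--     from user U to user v.
--     '''
--
--     # Finds the length of the network (how many users there are)
--     n = len(network)
--
--     # Make list to hold the count of mutual friends
--     similarity_matrix = []
--
--     # Create the rows for each user to hold their existing count of mutual friends
--     # with user v and vice versa ( 2 = [[0,0,0,0] , [0,0,0,0]] )
--     for i in range(n):
--         row = [0] * n
--         similarity_matrix.append(row)
--
--     # Iterates through list to find friends
--     for u in range(n):
--         for v in range(n):
--             num_in_common = num_in_common_between_lists(network[u], network[v])
--
--             similarity_matrix[u][v] = num_in_common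
--
--     return similarity_matrix
-- ===== SOURCE B (Python) =====
-- def calc_similarity_scores(network):
--     # Build a multiplicity counter per user once, then score each cell by
--     # looking up user u's friends in user v's counter (no per-pair double scan).
--     counters = []
--     for friends in network:
--         c = {}
--         for f in friends:
--             c[f] = c.get(f, 0) + 1
--         counters.append(c)
--     return [[sum(c.get(x, 0) for x in lu) for c in counters] for lu in network]
-- ===== Notes on version B (the rewrite author's own statement) =====
-- stated objective: faster
-- what changed: Replaces the per-pair nested list scans with per-user multiplicity counters built once; each matrix cell becomes a sum of hash lookups instead of a quadratic double loop.
import Mathlib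
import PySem

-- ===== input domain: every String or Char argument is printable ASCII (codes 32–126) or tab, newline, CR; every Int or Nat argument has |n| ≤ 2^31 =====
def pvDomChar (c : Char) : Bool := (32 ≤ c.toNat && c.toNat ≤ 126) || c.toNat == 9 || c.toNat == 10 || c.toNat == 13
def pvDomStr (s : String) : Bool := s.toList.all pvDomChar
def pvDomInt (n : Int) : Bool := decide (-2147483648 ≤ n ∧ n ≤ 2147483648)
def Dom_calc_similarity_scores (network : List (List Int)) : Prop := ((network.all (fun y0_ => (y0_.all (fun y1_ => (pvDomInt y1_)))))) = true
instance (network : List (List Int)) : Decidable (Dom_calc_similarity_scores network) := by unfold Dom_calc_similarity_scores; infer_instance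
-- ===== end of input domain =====

-- B builds one multiplicity counter per user and fills each cell from counter lookups,
-- instead of A's nested rescan of both friend lists for every cell; equivalent on all inputs.

-- ===== PORT A =====
def numInCommonBetweenLists (list1 list2 : List Int) : Int :=
  list1.foldl (fun count num1 =>
    list2.foldl (fun count num2 => if num1 == num2 then count + 1 else count) count) 0

-- similarity_matrix[u][v] = x; u, v come from range(n) so they are nonnegative and in
-- range, where .toNat is exact.
def pvSetCell (m : List (List Int)) (u v : Int) (x : Int) : List (List Int) :=
  m.set u.toNat ((m.getD u.toNat []).set v.toNat x)

def calc_similarity_scores (network : List (List Int)) : List (List Int) :=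
  let n : Int := network.length
  let simMatrix : List (List Int) :=
    (PySem.List.pyRange 0 n 1).foldl
      (fun m _ => m ++ [List.replicate network.length (0 : Int)]) []
  (PySem.List.pyRange 0 n 1).foldl (fun m u =>
    (PySem.List.pyRange 0 n 1).foldl (fun m v =>
      let numInCommon :=
        numInCommonBetweenLists (PySem.List.pyGetD network u [])
          (PySem.List.pyGetD network v [])
      pvSetCell m u v numInCommon) m) simMatrix

-- ===== PORT B =====
def calc_similarity_scores_alt (network : List (List Int)) : List (List Int) :=
  let counters : List (PySem.Dict Int Int) :=
    network.foldl (fun acc friends =>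
      acc ++ [friends.foldl (fun c f => c.insert f (c.getD f 0 + 1)) PySem.Dict.empty]) []
  network.map (fun lu => counters.map (fun c => (lu.map (fun x => c.getD x 0)).sum))

-- ===== PRECONDITION & SPEC =====
def Spec_calc_similarity_scores (network : List (List Int)) (out : List (List Int)) : Prop := out = calc_similarity_scores_alt network
instance (network : List (List Int)) (out : List (List Int)) : Decidable (Spec_calc_similarity_scores network out) := by unfold Spec_calc_similarity_scores; infer_instance

-- ===== CLAIM (what is proved, stated in full; the proofs are below) =====
def Claim_equal_calc_similarity_scores : Prop := ∀ (network : List (List Int)), Dom_calc_similarity_scores network → Spec_calc_similarity_scores network (calc_similarity_scores network)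

-- ===== LEMMAS AND PROOFS =====

-- A's cell value is the sum over list1 of how often each element occurs in list2.
theorem numInCommon_eq (l1 l2 : List Int) :
    numInCommonBetweenLists l1 l2 = (l1.map (fun x => (l2.count x : Int))).sum := by
  unfold numInCommonBetweenLists
  have h : ∀ (x c0 : Int),
      l2.foldl (fun count num2 => if x == num2 then count + 1 else count) c0
        = c0 + l2.count x := by
    intro x c0
    rw [PySem.List.foldl_count_if]
    simp [List.count_eq_countP]
    congr 1
    funext a
    simp [eq_comm]
  calc l1.foldl (fun count num1 =>
      l2.foldl (fun count num2 => if num1 == num2 then count + 1 else count) count) 0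
      = l1.foldl (fun count num1 => count + ((l2.count num1 : Int))) 0 := by
        apply PySem.List.foldl_congr_mem
        intro c num1 _
        exact h num1 c
    _ = (l1.map (fun x => (l2.count x : Int))).sum := by
        rw [PySem.List.foldl_add]
        simp

theorem set_getD_self {α : Type} (u : Nat) (m : List α) (d : α) :
    m.set u (m.getD u d) = m := by
  by_cases h : u < m.length
  · rw [List.getD_eq_getElem m d h]
    exact List.set_getElem_self h
  · rw [List.set_eq_of_length_le (by omega)]

-- the inner v-loop only touches row u, so it hoists to a single row update
theorem inner_hoist (u : Nat) (f : Nat → Int) :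
    ∀ (l : List Nat) (m : List (List Int)),
      l.foldl (fun m v => m.set u ((m.getD u []).set v (f v))) m
        = m.set u (l.foldl (fun r v => r.set v (f v)) (m.getD u [])) := by
  intro l
  induction l with
  | nil => intro m; exact (set_getD_self u m []).symm
  | cons v0 t ih =>
    intro m
    simp only [List.foldl_cons]
    rw [ih, List.set_set]
    congr 1
    congr 1
    by_cases h : u < m.length
    · rw [List.getD_eq_getElem _ _ (by simpa using h),
          List.getElem_set_self (by simpa using h), List.getD_eq_getElem m _ h]
    · rw [List.set_eq_of_length_le (by omega), List.getD_eq_default _ _ (by omega)]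
      simp

-- a fold over range k that sets slot i from its current value rewrites each prefix slot once
theorem foldl_set_range {α : Type} (h : Nat → α → α) (dflt : α) :
    ∀ (k : Nat) (xs : List α), k ≤ xs.length →
      (List.range k).foldl (fun l i => l.set i (h i (l.getD i dflt))) xs
        = (List.range k).map (fun i => h i (xs.getD i dflt)) ++ xs.drop k := by
  intro k
  induction k with
  | zero => intro xs _; simp
  | succ k ih =>
    intro xs hk
    rw [List.range_succ, List.foldl_append, List.map_append, ih xs (by omega)]
    simp only [List.foldl_cons, List.foldl_nil, List.map_cons, List.map_nil]
    have hklt : k < xs.length := by omega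
    have hlen : ((List.range k).map (fun i => h i (xs.getD i dflt))).length = k := by simp
    have hdrop : xs.drop k = xs[k] :: xs.drop (k + 1) := (List.getElem_cons_drop hklt).symm
    have hgetD : ((List.range k).map (fun i => h i (xs.getD i dflt)) ++ xs.drop k).getD k dflt
        = xs.getD k dflt := by
      rw [List.getD_eq_getElem?_getD, List.getElem?_append_right (by omega), hlen]
      rw [hdrop]
      simp only [Nat.sub_self, List.getElem?_cons_zero, Option.getD_some]
      rw [List.getD_eq_getElem xs dflt hklt]
    rw [hgetD]
    rw [List.set_append_right _ _ (by omega), hlen, Nat.sub_self, hdrop, List.set_cons_zero]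
    simp [List.getD_eq_getElem?_getD]

theorem foldl_set_range_const {α : Type} (g : Nat → α) (dflt : α)
    (k : Nat) (xs : List α) (hk : k ≤ xs.length) :
    (List.range k).foldl (fun l i => l.set i (g i)) xs
      = (List.range k).map g ++ xs.drop k := by
  simpa using foldl_set_range (fun i _ => g i) dflt k xs hk

theorem calc_A_closed (network : List (List Int)) :
    calc_similarity_scores network
      = network.map (fun lu => network.map (fun lv => numInCommonBetweenLists lu lv)) := by
  unfold calc_similarity_scores
  simp only [PySem.List.pyRange_zero_nat, List.foldl_map, pvSetCell,
    PySem.List.pyGetD_natCast, Int.toNat_natCast,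
    PySem.List.foldl_append_singleton_eq_map, List.nil_append, List.map_const',
    List.length_range]
  rw [show (fun (m : List (List Int)) (u : Nat) =>
      List.foldl (fun m v => m.set u ((m.getD u []).set v
        (numInCommonBetweenLists (network.getD u []) (network.getD v [])))) m
        (List.range network.length)) = fun m u => m.set u
        (List.foldl (fun r v => r.set v
          (numInCommonBetweenLists (network.getD u []) (network.getD v [])))
          (m.getD u []) (List.range network.length)) from
    funext fun m => funext fun u => inner_hoist u _ _ m]
  rw [foldl_set_range (fun u row => List.foldl (fun r v => r.set v
        (numInCommonBetweenLists (network.getD u []) (network.getD v []))) row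
        (List.range network.length)) [] network.length _ (by simp)]
  simp only [List.drop_of_length_le
    (by simp : (List.replicate network.length (List.replicate network.length (0:Int))).length
        ≤ network.length), List.append_nil]
  have hrow : ∀ u, u < network.length →
      (List.replicate network.length (List.replicate network.length (0:Int))).getD u []
        = List.replicate network.length (0:Int) := by
    intro u hu
    rw [List.getD_eq_getElem _ _ (by simpa using hu)]
    simp
  calc (List.range network.length).map (fun u =>
        List.foldl (fun r v => r.set v
          (numInCommonBetweenLists (network.getD u []) (network.getD v [])))
          ((List.replicate network.length (List.replicate network.length (0:Int))).getD u [])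
          (List.range network.length))
      = (List.range network.length).map (fun u =>
        (List.range network.length).map (fun v =>
          numInCommonBetweenLists (network.getD u []) (network.getD v []))) := by
        apply List.map_congr_left
        intro u hu
        rw [hrow u (by simpa using hu),
          foldl_set_range_const _ (0:Int) network.length _ (by simp)]
        simp
    _ = network.map (fun lu => network.map (fun lv => numInCommonBetweenLists lu lv)) := by
        apply List.ext_getElem (by simp)
        intro u h1 h2
        simp only [List.getElem_map, List.getElem_range]
        apply List.ext_getElem (by simp)
        intro v h3 h4
        simp only [List.getElem_map, List.getElem_range]
        rw [List.getD_eq_getElem network [] (by simpa using h2),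
            List.getD_eq_getElem network [] (by simpa using h4)]

theorem calc_B_closed (network : List (List Int)) :
    calc_similarity_scores_alt network
      = network.map (fun lu => network.map (fun lv =>
          (lu.map (fun x => (lv.count x : Int))).sum)) := by
  unfold calc_similarity_scores_alt
  simp only [PySem.List.foldl_append_singleton_eq_map, List.nil_append, List.map_map,
    Function.comp_def, PySem.Dict.getD_foldl_insert_add_one, PySem.Dict.getD_empty,
    zero_add]

-- ===== VERDICT (by name: the statement is the Claim_ definition above) =====
theorem calc_similarity_scores_spec : Claim_equal_calc_similarity_scores := by
  intro network _
  unfold Spec_calc_similarity_scores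
  rw [calc_A_closed, calc_B_closed]
  simp only [numInCommon_eq]
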